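-- pv_equiv track=rewrite | github.com/Jiuzhouh/UnPRM | generate_train_data.py | split_by_step
-- ===== SOURCE A (Python) =====
-- def split_by_step(tokens, probs):
--     result_tokens = []
--     result_probs = []
--     current_tokens = []
--     current_probs = []
--     for token, prob in zip(tokens, probs):
--         if token == 'Step':
--             if current_tokens:
--                 result_tokens.append(current_tokens)
--                 result_probs.append(current_probs)
--             current_tokens = [token]
--             current_probs = [prob]
--         else:
--             current_tokens.append(token)
--             current_probs.append(prob)
--     if current_tokens:
--         result_tokens.append(current_tokens)
--         result_probs.append(current_probs)
--     return result_tokens, result_probs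
-- ===== SOURCE B (Python) =====
-- def split_by_step(tokens, probs):
--     def groups(pairs):
--         if not pairs:
--             return []
--         rest = pairs[1:]
--         k = 0
--         while k < len(rest) and rest[k][0] != 'Step':
--             k += 1
--         return [[pairs[0]] + rest[:k]] + groups(rest[k:])
--     gs = groups(list(zip(tokens, probs)))
--     return [[t for t, _ in g] for g in gs], [[p for _, p in g] for g in gs]
-- ===== Notes on version B (the rewrite author's own statement) =====
-- stated objective: alternative
-- what changed: Replaces A's accumulate-and-flush state machine (four mutable lists, flush on each 'Step' and at the end) with a direct recursive decomposition: zip once, recursively peel off one group (head plus the run up to the next 'Step') via take/drop, then unzip the groups.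
import Mathlib
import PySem

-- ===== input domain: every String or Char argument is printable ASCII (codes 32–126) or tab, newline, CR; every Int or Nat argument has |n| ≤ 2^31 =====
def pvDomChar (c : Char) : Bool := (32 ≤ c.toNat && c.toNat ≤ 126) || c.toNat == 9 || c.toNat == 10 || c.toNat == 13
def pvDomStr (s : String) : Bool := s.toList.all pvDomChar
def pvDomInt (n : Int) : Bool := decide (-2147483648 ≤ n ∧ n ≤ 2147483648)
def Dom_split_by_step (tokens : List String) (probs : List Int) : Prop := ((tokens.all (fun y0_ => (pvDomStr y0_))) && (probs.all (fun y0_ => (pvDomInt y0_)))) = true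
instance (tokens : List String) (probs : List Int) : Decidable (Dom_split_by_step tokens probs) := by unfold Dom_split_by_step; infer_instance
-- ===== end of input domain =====

-- B replaces A's accumulate-and-flush state machine by a recursive group-peeling decomposition (alternative, same cost).

-- ===== PORT A =====
-- A's for-loop over zip(tokens, probs) with state (result_tokens, result_probs, current_tokens, current_probs),
-- followed by the final flush, as structural recursion over the pair list.
def splitLoopA : List (String × Int) → List (List String) → List (List Int) → List String → List Int → List (List String) × List (List Int)
  | [], rT, rP, cT, cP => if cT = [] then (rT, rP) else (rT ++ [cT], rP ++ [cP])
  | (t, p) :: rest, rT, rP, cT, cP =>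
    if t = "Step" then
      if cT = [] then splitLoopA rest rT rP [t] [p]
      else splitLoopA rest (rT ++ [cT]) (rP ++ [cP]) [t] [p]
    else splitLoopA rest rT rP (cT ++ [t]) (cP ++ [p])

def split_by_step (tokens : List String) (probs : List Int) : List (List String) × List (List Int) :=
  splitLoopA (tokens.zip probs) [] [] [] []

-- ===== PORT B =====
-- B's recursive `groups`: peel off the head pair plus the run rest[:k] up to the next 'Step' (rest[:k] = takeWhile, rest[k:] = dropWhile).
def groupsB : List (String × Int) → List (List (String × Int))
  | [] => []
  | h :: rest =>
    (h :: rest.takeWhile (fun q => q.1 ≠ "Step")) :: groupsB (rest.dropWhile (fun q => q.1 ≠ "Step"))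
termination_by pairs => pairs.length
decreasing_by
  simp only [List.length_cons]
  exact Nat.lt_succ_of_le (List.length_dropWhile_le _ _)

def split_by_step_alt (tokens : List String) (probs : List Int) : List (List String) × List (List Int) :=
  let gs := groupsB (tokens.zip probs)
  (gs.map (fun g => g.map Prod.fst), gs.map (fun g => g.map Prod.snd))

-- ===== PRECONDITION & SPEC =====
def Spec_split_by_step (tokens : List String) (probs : List Int) (out : List (List String) × List (List Int)) : Prop := out = split_by_step_alt tokens probs
instance (tokens : List String) (probs : List Int) (out : List (List String) × List (List Int)) : Decidable (Spec_split_by_step tokens probs out) := by unfold Spec_split_by_step; infer_instance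

-- ===== CLAIM (what is proved, stated in full; the proofs are below) =====
def Claim_equal_split_by_step : Prop := ∀ (tokens : List String) (probs : List Int), Dom_split_by_step tokens probs → Spec_split_by_step tokens probs (split_by_step tokens probs)

-- ===== LEMMAS AND PROOFS =====

-- Invariant of A's loop: with a nonempty current group, the loop emits rT/rP, then the current group
-- extended by the run up to the next 'Step', then B's groups of the remainder.
theorem splitLoopA_eq (rest : List (String × Int)) :
    ∀ rT rP cT cP, cT ≠ [] →
    splitLoopA rest rT rP cT cP =
      (rT ++ (cT ++ (rest.takeWhile (fun q => q.1 ≠ "Step")).map Prod.fst)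
            :: (groupsB (rest.dropWhile (fun q => q.1 ≠ "Step"))).map (fun g => g.map Prod.fst),
       rP ++ (cP ++ (rest.takeWhile (fun q => q.1 ≠ "Step")).map Prod.snd)
            :: (groupsB (rest.dropWhile (fun q => q.1 ≠ "Step"))).map (fun g => g.map Prod.snd)) := by
  induction rest with
  | nil =>
    intro rT rP cT cP hcT
    simp [splitLoopA, hcT, groupsB]
  | cons hd tl ih =>
    intro rT rP cT cP hcT
    obtain ⟨t, p⟩ := hd
    by_cases ht : t = "Step"
    · subst ht
      simp only [splitLoopA, if_neg hcT]
      rw [ih _ _ _ _ (by simp)]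
      simp [groupsB, List.append_assoc]
    · simp only [splitLoopA, if_neg ht]
      rw [ih _ _ _ _ (by simp)]
      simp [ht, List.append_assoc]

theorem split_eq (tokens : List String) (probs : List Int) :
    split_by_step tokens probs = split_by_step_alt tokens probs := by
  unfold split_by_step split_by_step_alt
  cases h : tokens.zip probs with
  | nil => simp [splitLoopA, groupsB]
  | cons hd tl =>
    obtain ⟨t, p⟩ := hd
    by_cases ht : t = "Step"
    · subst ht
      simp only [splitLoopA, if_pos rfl]
      rw [splitLoopA_eq _ _ _ _ _ (by simp)]
      simp [groupsB]
    · simp only [splitLoopA, if_neg ht]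
      rw [splitLoopA_eq _ _ _ _ _ (by simp)]
      simp [groupsB]

-- ===== VERDICT (by name: the statement is the Claim_ definition above) =====
theorem split_by_step_spec : Claim_equal_split_by_step := by
  intro tokens probs _
  unfold Spec_split_by_step
  exact split_eq tokens probs
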